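-- pv_equiv track=rewrite | github.com/WilliamWaly/Github-Tema-4 | DAT120/Oppg i.py | tell_temperaturdager
-- ===== SOURCE A (Python) =====
-- def tell_temperaturdager(temperaturer):
--     antall_sommerdager = 0
--     antall_hoysommerdager = 0
--     antall_tropedager = 0
--
--     for temperatur in temperaturer:
--         if temperatur > 20:
--             antall_sommerdager += 1
--         if temperatur > 25:
--             antall_hoysommerdager += 1
--         if temperatur > 30:
--             antall_tropedager += 1
--
--     return antall_sommerdager, antall_hoysommerdager, antall_tropedager
-- ===== SOURCE B (Python) =====
-- def _bisect_right(a, x):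
--     # hand-written bisect.bisect_right (A imports nothing, so no bisect module)
--     lo, hi = 0, len(a)
--     while lo < hi:
--         mid = (lo + hi) // 2
--         if x < a[mid]:
--             hi = mid
--         else:
--             lo = mid + 1
--     return lo
--
--
-- def tell_temperaturdager(temperaturer):
--     s = sorted(temperaturer)
--     n = len(s)
--     return (n - _bisect_right(s, 20),
--             n - _bisect_right(s, 25),
--             n - _bisect_right(s, 30))
-- ===== Notes on version B (the rewrite author's own statement) =====
-- stated objective: alternative
-- what changed: Replaces A's single counting pass with three conditional counters by sorting a copy once and computing each strictly-greater count as n minus a binary-search (bisect_right) position.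
import Mathlib
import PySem

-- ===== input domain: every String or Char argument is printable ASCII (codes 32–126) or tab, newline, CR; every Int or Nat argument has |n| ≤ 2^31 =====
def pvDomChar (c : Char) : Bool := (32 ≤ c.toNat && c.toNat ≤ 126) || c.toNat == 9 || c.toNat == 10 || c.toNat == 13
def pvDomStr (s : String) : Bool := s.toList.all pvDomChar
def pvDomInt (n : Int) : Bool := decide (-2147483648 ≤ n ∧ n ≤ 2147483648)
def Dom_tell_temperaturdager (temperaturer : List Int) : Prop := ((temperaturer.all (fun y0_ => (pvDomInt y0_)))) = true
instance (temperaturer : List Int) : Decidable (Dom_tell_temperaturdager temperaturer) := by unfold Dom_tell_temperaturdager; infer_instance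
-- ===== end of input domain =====

-- B replaces A's single counting pass by sort-once + three binary-search (bisect_right) counts; alternative decomposition, return value identical.

-- ===== PORT A =====
-- one pass, three running counters
def tell_temperaturdager (temperaturer : List Int) : Int × Int × Int :=
  temperaturer.foldl
    (fun (acc : Int × Int × Int) temperatur =>
      (acc.1 + (if temperatur > 20 then 1 else 0),
       acc.2.1 + (if temperatur > 25 then 1 else 0),
       acc.2.2 + (if temperatur > 30 then 1 else 0)))
    (0, 0, 0)

-- ===== PORT B =====
-- sorted copy; each count is n - bisect_right(s, threshold).
-- PySem.List.bisectRight is exactly Source B's hand-written _bisect_right loop (lo/hi, mid=(lo+hi)//2, x<a[mid] → hi=mid else lo=mid+1).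
def tell_temperaturdager_alt (temperaturer : List Int) : Int × Int × Int :=
  let s := PySem.List.sorted temperaturer (fun x => x) false
  let n : Int := (s.length : Int)
  (n - (PySem.List.bisectRight s 20 : Int),
   n - (PySem.List.bisectRight s 25 : Int),
   n - (PySem.List.bisectRight s 30 : Int))

-- ===== PRECONDITION & SPEC =====
def Spec_tell_temperaturdager (temperaturer : List Int) (out : Int × Int × Int) : Prop := out = tell_temperaturdager_alt temperaturer
instance (temperaturer : List Int) (out : Int × Int × Int) : Decidable (Spec_tell_temperaturdager temperaturer out) := by unfold Spec_tell_temperaturdager; infer_instance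

-- ===== CLAIM (what is proved, stated in full; the proofs are below) =====
def Claim_equal_tell_temperaturdager : Prop := ∀ (temperaturer : List Int), Dom_tell_temperaturdager temperaturer → Spec_tell_temperaturdager temperaturer (tell_temperaturdager temperaturer)

-- ===== LEMMAS AND PROOFS =====

-- A's fold equals three countP's (accumulator generalised)
theorem foldA_countP (l : List Int) (a b c : Int) :
    l.foldl
      (fun (acc : Int × Int × Int) temperatur =>
        (acc.1 + (if temperatur > 20 then 1 else 0),
         acc.2.1 + (if temperatur > 25 then 1 else 0),
         acc.2.2 + (if temperatur > 30 then 1 else 0)))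
      (a, b, c)
    = (a + (l.countP (fun t => decide ((20:Int) < t)) : Int),
       b + (l.countP (fun t => decide ((25:Int) < t)) : Int),
       c + (l.countP (fun t => decide ((30:Int) < t)) : Int)) := by
  induction l generalizing a b c with
  | nil => simp
  | cons h t ih =>
      simp only [List.foldl_cons, List.countP_cons, ih]
      by_cases h20 : (20:Int) < h <;> by_cases h25 : (25:Int) < h <;> by_cases h30 : (30:Int) < h <;>
        simp [h20, h25, h30] <;> omega

-- on a ≤-sorted list, the strictly-greater elements are exactly the suffix from bisectRight
theorem filter_gt_eq_drop_bisect (s : List Int) (x : Int)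
    (hs : List.Pairwise (fun a b => a ≤ b) s) :
    s.filter (fun t => decide (x < t)) = s.drop (PySem.List.bisectRight s x) := by
  obtain ⟨hle, hbefore, hafter⟩ := PySem.List.bisectRight_spec s x hs
  set b := PySem.List.bisectRight s x with hb
  conv_lhs => rw [← List.take_append_drop b s]
  rw [List.filter_append]
  have h1 : (s.take b).filter (fun t => decide (x < t)) = [] := by
    rw [List.filter_eq_nil_iff]
    intro y hy
    obtain ⟨i, hi, hget⟩ := List.mem_iff_getElem.mp hy
    have hib : i < b := lt_of_lt_of_le hi (by simp)
    have hin : i < s.length := lt_of_lt_of_le hib hle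
    have := hbefore i hin hib
    rw [List.getElem_take] at hget
    simp [← hget]
    omega
  have h2 : (s.drop b).filter (fun t => decide (x < t)) = s.drop b := by
    rw [List.filter_eq_self]
    intro y hy
    obtain ⟨i, hi, hget⟩ := List.mem_iff_getElem.mp hy
    rw [List.getElem_drop] at hget
    have hin : b + i < s.length := by
      have := hi; simp [List.length_drop] at this; omega
    have := hafter (b + i) hin (Nat.le_add_right _ _)
    simp [← hget]
    omega
  rw [h1, h2, List.nil_append]

theorem countP_gt_eq_sub (s : List Int) (x : Int)
    (hs : List.Pairwise (fun a b => a ≤ b) s) :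
    (s.countP (fun t => decide (x < t)) : Int)
      = (s.length : Int) - (PySem.List.bisectRight s x : Int) := by
  obtain ⟨hle, -, -⟩ := PySem.List.bisectRight_spec s x hs
  have := filter_gt_eq_drop_bisect s x hs
  rw [List.countP_eq_length_filter, this, List.length_drop]
  omega

-- ===== VERDICT (by name: the statement is the Claim_ definition above) =====
theorem tell_temperaturdager_spec : Claim_equal_tell_temperaturdager := by
  intro temperaturer _
  unfold Spec_tell_temperaturdager tell_temperaturdager tell_temperaturdager_alt
  set s := PySem.List.sorted temperaturer (fun x => x) false with hsdef
  have hperm : s.Perm temperaturer := PySem.List.sorted_perm temperaturer (fun x => x) false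
  have hs : List.Pairwise (fun a b => a ≤ b) s := PySem.List.sorted_pairwise temperaturer (fun x => x)
  have hlen : temperaturer.length = s.length := (hperm.length_eq).symm
  rw [foldA_countP]
  have h20 := countP_gt_eq_sub s 20 hs
  have h25 := countP_gt_eq_sub s 25 hs
  have h30 := countP_gt_eq_sub s 30 hs
  rw [hperm.countP_eq (fun t => decide ((20:Int) < t))] at h20
  rw [hperm.countP_eq (fun t => decide ((25:Int) < t))] at h25
  rw [hperm.countP_eq (fun t => decide ((30:Int) < t))] at h30
  rw [h20, h25, h30]
  simp
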